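-- pv_equiv track=rewrite | github.com/oooozi/band_matcher | utils.py | assign_schedule
-- ===== SOURCE A (Python) =====
-- from collections import defaultdict
--
-- def assign_schedule(time_list: list, person_role: dict, rooms: int, sort_by="count_first") -> dict:
--     schedule = defaultdict(list)  # time -> list of (song, count, weight)
--     assigned = set()  # (person, time) 중복 방지용
--
--     # 정렬 기준 파라미터 (여러 기준 중 골라서 적용 가능)
--     if sort_by == "count_first":
--         sort_key = lambda x: (x[0], -x[2], -x[3])  # 시간, 인원수, 가중치 (기본)
--     elif sort_by == "weight_first":
--         sort_key = lambda x: (x[0], -x[3], -x[2])  # 시간, 가중치, 인원수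
--     else:
--         sort_key = lambda x: (x[0], x[1])  # 시간, 곡 이름순 (방어용: 다른 단어 넣으면 적용됨)
--
--     for time, song, count, weight in sorted(time_list, key=sort_key):
--         if len(schedule[time]) >= rooms:
--             continue
--
--         conflict = False
--         for person, roles in person_role.items():
--             for role_song, _ in roles:
--                 if role_song == song:
--                     if (person, time) in assigned:
--                         conflict = True
--                         break
--
--         if not conflict:
--             schedule[time].append((song, count, weight))
--             for person, roles in person_role.items():
--                 for role_song, _ in roles:
--                     if role_song == song:
--                         assigned.add((person, time))
--
--     return dict(schedule)
-- ===== SOURCE B (Python) =====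
-- def assign_schedule(time_list: list, person_role: dict, rooms: int, sort_by="count_first") -> dict:
--     # Index each song by the set of persons playing it, built once.
--     song_persons = {}
--     for person, roles in person_role.items():
--         for role_song, _ in roles:
--             song_persons.setdefault(role_song, set()).add(person)
--
--     if sort_by == "count_first":
--         sort_key = lambda x: (x[0], -x[2], -x[3])
--     elif sort_by == "weight_first":
--         sort_key = lambda x: (x[0], -x[3], -x[2])
--     else:
--         sort_key = lambda x: (x[0], x[1])
--     ordered = sorted(time_list, key=sort_key)
--
--     # Entries of one time are consecutive in `ordered`; handle each run with a
--     # fresh per-time busy set instead of one global (person, time) set.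
--     result = {}
--     i, n = 0, len(ordered)
--     while i < n:
--         time = ordered[i][0]
--         chosen = []
--         busy = set()
--         while i < n and ordered[i][0] == time:
--             _, song, count, weight = ordered[i]
--             i += 1
--             if len(chosen) >= rooms:
--                 continue
--             persons = song_persons.get(song, set())
--             if persons & busy:
--                 continue
--             chosen.append((song, count, weight))
--             busy |= persons
--         result[time] = chosen
--     return result
-- ===== Notes on version B (the rewrite author's own statement) =====
-- stated objective: faster
-- what changed: B builds a song->persons index once and processes the sorted list as consecutive same-time runs, each with a fresh per-time busy set of persons, instead of A's rescan of every person's whole role list per entry against one global (person,time) set.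
import Mathlib
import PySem

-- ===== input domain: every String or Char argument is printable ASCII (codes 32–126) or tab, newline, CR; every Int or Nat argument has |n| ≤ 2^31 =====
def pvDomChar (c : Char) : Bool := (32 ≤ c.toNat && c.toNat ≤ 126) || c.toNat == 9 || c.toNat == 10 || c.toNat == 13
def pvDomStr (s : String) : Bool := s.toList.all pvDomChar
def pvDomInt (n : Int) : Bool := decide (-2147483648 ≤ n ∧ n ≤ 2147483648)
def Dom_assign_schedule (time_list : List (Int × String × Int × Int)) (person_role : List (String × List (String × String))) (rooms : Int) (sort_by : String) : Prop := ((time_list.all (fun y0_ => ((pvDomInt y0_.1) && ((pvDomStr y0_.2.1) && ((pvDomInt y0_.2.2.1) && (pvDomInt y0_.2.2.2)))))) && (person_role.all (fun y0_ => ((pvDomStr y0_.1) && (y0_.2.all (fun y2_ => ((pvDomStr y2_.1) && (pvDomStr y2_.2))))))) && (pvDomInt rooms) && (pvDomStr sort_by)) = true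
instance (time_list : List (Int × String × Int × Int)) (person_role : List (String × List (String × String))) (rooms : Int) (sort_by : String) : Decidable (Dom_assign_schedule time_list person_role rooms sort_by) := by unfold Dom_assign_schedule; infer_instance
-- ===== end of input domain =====

-- B builds a song→persons index once and processes the sorted list as consecutive
-- same-time runs with a fresh per-time busy set, instead of A's per-entry rescan of
-- every person's role list against one global (person, time) set; same return value.

-- ===== PORT A =====
-- one iteration of A's main loop over state (schedule, assigned)
def pvStepA (items : List (String × List (String × String))) (rooms : Int)
    (st : PySem.Dict Int (List (String × Int × Int)) × PySem.Set (String × Int))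
    (x : Int × String × Int × Int) :
    PySem.Dict Int (List (String × Int × Int)) × PySem.Set (String × Int) :=
  -- schedule[time] is a defaultdict access: it creates the (possibly empty) entry first
  if rooms ≤ (((st.1.setdefault x.1 []).getD x.1 []).length : Int) then
    (st.1.setdefault x.1 [], st.2)
  -- conflict scan: every person, every role
  else if items.any (fun pr => pr.2.any (fun r => r.1 == x.2.1 && PySem.Set.contains st.2 (pr.1, x.1))) then
    (st.1.setdefault x.1 [], st.2)
  else
    ((st.1.setdefault x.1 []).modify x.1 [] (fun l => l ++ [(x.2.1, x.2.2.1, x.2.2.2)]),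
     items.foldl (fun s pr => pr.2.foldl
       (fun s r => if r.1 == x.2.1 then PySem.Set.add s (pr.1, x.1) else s) s) st.2)

def assign_schedule (time_list : List (Int × String × Int × Int)) (person_role : List (String × List (String × String))) (rooms : Int) (sort_by : String) : List (Int × List (String × Int × Int)) :=
  let items := (PySem.Dict.ofList person_role).items   -- person_role is a Python dict
  let ordered :=
    if sort_by = "count_first" then
      PySem.List.sorted time_list (fun x => (toLex (x.1, toLex (-x.2.2.1, -x.2.2.2)) : Lex (Int × Lex (Int × Int))))
    else if sort_by = "weight_first" then
      PySem.List.sorted time_list (fun x => (toLex (x.1, toLex (-x.2.2.2, -x.2.2.1)) : Lex (Int × Lex (Int × Int))))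
    else
      PySem.List.sorted time_list (fun x => (toLex (x.1, x.2.1) : Lex (Int × String)))
  (ordered.foldl (pvStepA items rooms) (PySem.Dict.empty, PySem.Set.empty)).1.items

-- ===== PORT B =====
-- song -> set of persons playing it, built once
def pvSongIndex (items : List (String × List (String × String))) : PySem.Dict String (PySem.Set String) :=
  items.foldl (fun d pr => pr.2.foldl
    (fun d r => d.modify r.1 PySem.Set.empty (fun s => PySem.Set.add s pr.1)) d) PySem.Dict.empty

-- B's inner while: consume the entries of the current time, greedily choosing;
-- returns (chosen, remaining entries after the run)
def pvRun (sp : PySem.Dict String (PySem.Set String)) (rooms : Int) (time : Int) :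
    List (Int × String × Int × Int) → List (String × Int × Int) → PySem.Set String →
    List (String × Int × Int) × List (Int × String × Int × Int)
  | [], chosen, _ => (chosen, [])
  | x :: rest, chosen, busy =>
    if x.1 = time then
      if rooms ≤ (chosen.length : Int) then pvRun sp rooms time rest chosen busy
      else if PySem.Set.inter (sp.getD x.2.1 PySem.Set.empty) busy ≠ [] then
        pvRun sp rooms time rest chosen busy
      else
        pvRun sp rooms time rest (chosen ++ [(x.2.1, x.2.2.1, x.2.2.2)])
          (PySem.Set.union busy (sp.getD x.2.1 PySem.Set.empty))
    else (chosen, x :: rest)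

-- the remainder a run leaves is exactly the entries after the current time's block
-- (needed for pvGroups' termination)
lemma pvRun_snd (sp : PySem.Dict String (PySem.Set String)) (rooms time : Int) :
    ∀ (l : List (Int × String × Int × Int)) (chosen : List (String × Int × Int)) (busy : PySem.Set String),
      (pvRun sp rooms time l chosen busy).2 = l.dropWhile (fun e => e.1 == time) := by
  intro l
  induction l with
  | nil => intro chosen busy; simp [pvRun]
  | cons x rest ih =>
    intro chosen busy
    by_cases h : x.1 = time
    · rw [List.dropWhile_cons, if_pos (by simpa using h)]
      simp only [pvRun, if_pos h]
      split_ifs <;> apply ih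
    · rw [List.dropWhile_cons, if_neg (by simpa using h)]
      simp [pvRun, h]

-- B's outer while: one run per (consecutive block of a) time value
def pvGroups (sp : PySem.Dict String (PySem.Set String)) (rooms : Int) :
    List (Int × String × Int × Int) → List (Int × List (String × Int × Int))
  | [] => []
  | x :: rest =>
    let pr := pvRun sp rooms x.1 (x :: rest) [] PySem.Set.empty
    (x.1, pr.1) :: pvGroups sp rooms pr.2
termination_by l => l.length
decreasing_by
  have h := pvRun_snd sp rooms x.1 (x :: rest) [] PySem.Set.empty
  rw [List.dropWhile_cons, if_pos (by simp)] at h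
  have := List.length_dropWhile_le (fun e : Int × String × Int × Int => e.1 == x.1) rest
  simp only [h, List.length_cons]
  omega

-- B's result dict assigns each run's (fresh, never-repeated) time once, so its
-- items are exactly the list of (time, chosen) pairs in run order.
def assign_schedule_alt (time_list : List (Int × String × Int × Int)) (person_role : List (String × List (String × String))) (rooms : Int) (sort_by : String) : List (Int × List (String × Int × Int)) :=
  let sp := pvSongIndex (PySem.Dict.ofList person_role).items
  let ordered :=
    if sort_by = "count_first" then
      PySem.List.sorted time_list (fun x => (toLex (x.1, toLex (-x.2.2.1, -x.2.2.2)) : Lex (Int × Lex (Int × Int))))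
    else if sort_by = "weight_first" then
      PySem.List.sorted time_list (fun x => (toLex (x.1, toLex (-x.2.2.2, -x.2.2.1)) : Lex (Int × Lex (Int × Int))))
    else
      PySem.List.sorted time_list (fun x => (toLex (x.1, x.2.1) : Lex (Int × String)))
  pvGroups sp rooms ordered

-- ===== PRECONDITION & SPEC =====
def Spec_assign_schedule (time_list : List (Int × String × Int × Int)) (person_role : List (String × List (String × String))) (rooms : Int) (sort_by : String) (out : List (Int × List (String × Int × Int))) : Prop := out = assign_schedule_alt time_list person_role rooms sort_by
instance (time_list : List (Int × String × Int × Int)) (person_role : List (String × List (String × String))) (rooms : Int) (sort_by : String) (out : List (Int × List (String × Int × Int))) : Decidable (Spec_assign_schedule time_list person_role rooms sort_by out) := by unfold Spec_assign_schedule; infer_instance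

-- ===== CLAIM (what is proved, stated in full; the proofs are below) =====
def Claim_equal_assign_schedule : Prop := ∀ (time_list : List (Int × String × Int × Int)) (person_role : List (String × List (String × String))) (rooms : Int) (sort_by : String), Dom_assign_schedule time_list person_role rooms sort_by → Spec_assign_schedule time_list person_role rooms sort_by (assign_schedule time_list person_role rooms sort_by)

-- ===== LEMMAS AND PROOFS =====

-- membership in one person's contribution to the index
lemma pv_mem_inner (roles : List (String × String)) (person : String)
    (d : PySem.Dict String (PySem.Set String)) (song p : String) :
    p ∈ (roles.foldl (fun d r => d.modify r.1 PySem.Set.empty (fun s => PySem.Set.add s person)) d).getD song PySem.Set.empty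
      ↔ p ∈ d.getD song PySem.Set.empty ∨ (p = person ∧ ∃ r ∈ roles, r.1 = song) := by
  induction roles generalizing d with
  | nil => simp
  | cons r rs ih =>
    simp only [List.foldl_cons, ih, PySem.Dict.getD_modify]
    by_cases h : song = r.1
    · subst h; simp [PySem.Set.mem_add]; tauto
    · have h' : r.1 ≠ song := fun e => h e.symm
      simp [h, h']

-- membership in the song→persons index
lemma pv_mem_songIndex (items : List (String × List (String × String))) (song p : String) :
    p ∈ (pvSongIndex items).getD song PySem.Set.empty
      ↔ ∃ pr ∈ items, pr.1 = p ∧ ∃ r ∈ pr.2, r.1 = song := by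
  have gen : ∀ (l : List (String × List (String × String))) (d : PySem.Dict String (PySem.Set String)),
      p ∈ (l.foldl (fun d pr => pr.2.foldl
            (fun d r => d.modify r.1 PySem.Set.empty (fun s => PySem.Set.add s pr.1)) d) d).getD song PySem.Set.empty
        ↔ p ∈ d.getD song PySem.Set.empty ∨ ∃ pr ∈ l, pr.1 = p ∧ ∃ r ∈ pr.2, r.1 = song := by
    intro l
    induction l with
    | nil => simp
    | cons pr l ih =>
      intro d
      simp only [List.foldl_cons, ih, pv_mem_inner]
      constructor
      · rintro ((h | ⟨hp, r, hr, hs⟩) | h)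
        · exact Or.inl h
        · exact Or.inr ⟨pr, by simp, hp.symm, r, hr, hs⟩
        · obtain ⟨q, hq, h⟩ := h; exact Or.inr ⟨q, by simp [hq], h⟩
      · rintro (h | ⟨q, hq, hqp, r, hr, hs⟩)
        · exact Or.inl (Or.inl h)
        · rcases List.mem_cons.mp hq with hq | hq
          · subst hq; exact Or.inl (Or.inr ⟨hqp.symm, r, hr, hs⟩)
          · exact Or.inr ⟨q, hq, hqp, r, hr, hs⟩
  simpa [pvSongIndex] using gen items PySem.Dict.empty

-- membership after A's nested "add everyone on this song" update
lemma pv_mem_updA (items : List (String × List (String × String))) (song : String) (time : Int)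
    (s : PySem.Set (String × Int)) (y : String × Int) :
    y ∈ items.foldl (fun s pr => pr.2.foldl
          (fun s r => if r.1 == song then PySem.Set.add s (pr.1, time) else s) s) s
      ↔ y ∈ s ∨ ∃ pr ∈ items, (∃ r ∈ pr.2, r.1 = song) ∧ y = (pr.1, time) := by
  have inner : ∀ (roles : List (String × String)) (person : String) (s : PySem.Set (String × Int)),
      y ∈ roles.foldl (fun s r => if r.1 == song then PySem.Set.add s (person, time) else s) s
        ↔ y ∈ s ∨ ((∃ r ∈ roles, r.1 = song) ∧ y = (person, time)) := by
    intro roles person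
    induction roles with
    | nil => simp
    | cons r rs ih =>
      intro s
      simp only [List.foldl_cons]
      by_cases h : r.1 = song
      · rw [if_pos (by simpa using h), ih]
        simp only [PySem.Set.mem_add, List.mem_cons]
        constructor
        · rintro ((hy | hy) | ⟨_, hy⟩)
          · exact Or.inl hy
          · exact Or.inr ⟨⟨r, Or.inl rfl, h⟩, hy⟩
          · exact Or.inr ⟨⟨r, Or.inl rfl, h⟩, ‹_›⟩
        · rintro (hy | ⟨_, hy⟩)
          · exact Or.inl (Or.inl hy)
          · exact Or.inl (Or.inr hy)
      · rw [if_neg (by simpa using h), ih]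
        simp only [List.mem_cons]
        constructor
        · rintro (hy | ⟨⟨r', hr', hs'⟩, hy⟩)
          · exact Or.inl hy
          · exact Or.inr ⟨⟨r', Or.inr hr', hs'⟩, hy⟩
        · rintro (hy | ⟨⟨r', hr', hs'⟩, hy⟩)
          · exact Or.inl hy
          · rcases hr' with hr' | hr'
            · subst hr'; exact absurd hs' h
            · exact Or.inr ⟨⟨r', hr', hs'⟩, hy⟩
  induction items generalizing s with
  | nil => simp
  | cons pr l ih =>
    simp only [List.foldl_cons, ih, inner]
    constructor
    · rintro ((h | h) | ⟨q, hq, h⟩)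
      · exact Or.inl h
      · exact Or.inr ⟨pr, by simp, h⟩
      · exact Or.inr ⟨q, by simp [hq], h⟩
    · rintro (h | ⟨q, hq, h⟩)
      · exact Or.inl (Or.inl h)
      · rcases List.mem_cons.mp hq with hq | hq
        · subst hq; exact Or.inl (Or.inr h)
        · exact Or.inr ⟨q, hq, h⟩

-- A's conflict scan equals B's nonempty-intersection test when busy mirrors assigned at this time
lemma pv_conflict (items : List (String × List (String × String))) (song : String) (time : Int)
    (sA : PySem.Set (String × Int)) (busy : PySem.Set String)
    (h : ∀ p, (p, time) ∈ sA ↔ p ∈ busy) :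
    items.any (fun pr => pr.2.any (fun r => r.1 == song && PySem.Set.contains sA (pr.1, time)))
      = decide (PySem.Set.inter ((pvSongIndex items).getD song PySem.Set.empty) busy ≠ []) := by
  rw [Bool.eq_iff_iff]
  simp only [List.any_eq_true, Bool.and_eq_true, beq_iff_eq, PySem.Set.contains_iff,
    decide_eq_true_eq]
  constructor
  · rintro ⟨pr, hpr, r, hr, hs, hin⟩
    intro hnil
    have hp : pr.1 ∈ PySem.Set.inter ((pvSongIndex items).getD song PySem.Set.empty) busy :=
      (PySem.Set.mem_inter _ _ _).mpr
        ⟨(pv_mem_songIndex items song pr.1).mpr ⟨pr, hpr, rfl, r, hr, hs⟩, (h pr.1).mp hin⟩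
    rw [hnil] at hp
    exact absurd hp (List.not_mem_nil)
  · intro hne
    obtain ⟨p, hp⟩ := List.exists_mem_of_ne_nil _ hne
    rw [PySem.Set.mem_inter] at hp
    obtain ⟨pr, hpr, hp1, r, hr, hs⟩ := (pv_mem_songIndex items song p).mp hp.1
    subst hp1
    exact ⟨pr, hpr, r, hr, hs, (h pr.1).mpr hp.2⟩

-- processing one same-time run: A's fold mirrors pvRun
lemma pv_run (items : List (String × List (String × String))) (rooms t : Int) :
    ∀ (l : List (Int × String × Int × Int)) (sched : PySem.Dict Int (List (String × Int × Int)))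
      (sA : PySem.Set (String × Int)) (chosen : List (String × Int × Int)) (busy : PySem.Set String),
      sched.contains t = true →
      sched.getD t [] = chosen →
      (∀ p, (p, t) ∈ sA ↔ p ∈ busy) →
      ∃ sched' sA',
        l.foldl (pvStepA items rooms) (sched, sA)
          = (pvRun (pvSongIndex items) rooms t l chosen busy).2.foldl (pvStepA items rooms) (sched', sA')
        ∧ sched'.keys = sched.keys
        ∧ sched'.getD t [] = (pvRun (pvSongIndex items) rooms t l chosen busy).1
        ∧ (∀ τ, τ ≠ t → sched'.getD τ [] = sched.getD τ [])
        ∧ (∀ p τ, (p, τ) ∈ sA' → (p, τ) ∈ sA ∨ τ = t) := by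
  intro l
  induction l with
  | nil =>
    intro sched sA chosen busy H2 H3 Hb
    exact ⟨sched, sA, rfl, rfl, H3, fun τ _ => rfl, fun p τ h => Or.inl h⟩
  | cons x rest ih =>
    intro sched sA chosen busy H2 H3 Hb
    obtain ⟨xt, song, cnt, wt⟩ := x
    by_cases hx : xt = t
    · subst hx
      have hsd : sched.setdefault xt [] = sched := PySem.Dict.setdefault_of_contains sched [] H2
      have hcf := pv_conflict items song xt sA busy Hb
      simp only [List.foldl_cons, pvRun, if_true, pvStepA, hsd, H3]
      by_cases hfull : rooms ≤ (chosen.length : Int)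
      · rw [if_pos hfull, if_pos hfull]
        exact ih sched sA chosen busy H2 H3 Hb
      · rw [if_neg hfull, if_neg hfull]
        by_cases hB : PySem.Set.inter ((pvSongIndex items).getD song PySem.Set.empty) busy ≠ []
        · rw [if_pos (by rw [hcf]; exact decide_eq_true hB), if_pos hB]
          exact ih sched sA chosen busy H2 H3 Hb
        · rw [if_neg (by rw [hcf]; simpa using hB), if_neg hB]
          have H2' : (sched.modify xt [] fun l => l ++ [(song, cnt, wt)]).contains xt = true := by
            simp [PySem.Dict.contains_modify]
          have H3' : (sched.modify xt [] fun l => l ++ [(song, cnt, wt)]).getD xt []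
              = chosen ++ [(song, cnt, wt)] := by
            rw [PySem.Dict.getD_modify_self, H3]
          have Hb' : ∀ p, (p, xt) ∈ (items.foldl (fun s pr => pr.2.foldl
                (fun s r => if r.1 == song then PySem.Set.add s (pr.1, xt) else s) s) sA)
              ↔ p ∈ PySem.Set.union busy ((pvSongIndex items).getD song PySem.Set.empty) := by
            intro p
            rw [pv_mem_updA, PySem.Set.mem_union, Hb]
            constructor
            · rintro (h | ⟨pr, hpr, hmatch, hy⟩)
              · exact Or.inl h
              · refine Or.inr ((pv_mem_songIndex items song p).mpr ⟨pr, hpr, ?_, hmatch⟩)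
                exact (congrArg Prod.fst hy).symm
            · rintro (h | h)
              · exact Or.inl h
              · obtain ⟨pr, hpr, hp1, hmatch⟩ := (pv_mem_songIndex items song p).mp h
                exact Or.inr ⟨pr, hpr, hmatch, by rw [hp1]⟩
          obtain ⟨sched', sA', e1, e2, e3, e4, e5⟩ := ih _ _ _ _ H2' H3' Hb'
          refine ⟨sched', sA', e1, ?_, e3, ?_, ?_⟩
          · rw [e2, PySem.Dict.keys_modify, PySem.Dict.keys_insert_of_contains _ _ H2]
          · intro τ hτ
            rw [e4 τ hτ, PySem.Dict.getD_modify_of_ne _ _ _ hτ]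
          · intro p τ h
            rcases e5 p τ h with h | rfl
            · rw [pv_mem_updA] at h
              rcases h with h | ⟨pr, hpr, hm, hy⟩
              · exact Or.inl h
              · exact Or.inr (congrArg Prod.snd hy)
            · exact Or.inr rfl
    · refine ⟨sched, sA, ?_, rfl, ?_, fun τ _ => rfl, fun p τ h => Or.inl h⟩
      · simp [pvRun, hx]
      · simp [pvRun, hx, H3]

-- everything left after dropping the current time's block has a strictly later time
lemma pv_dropWhile_lt (t : Int) :
    ∀ (l : List (Int × String × Int × Int)),
      (∀ e ∈ l, t ≤ e.1) → l.Pairwise (fun a b => a.1 ≤ b.1) →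
      ∀ e ∈ l.dropWhile (fun e => e.1 == t), t < e.1 := by
  intro l
  induction l with
  | nil => simp
  | cons x rest ih =>
    intro hle hpw
    by_cases hx : x.1 = t
    · rw [List.dropWhile_cons, if_pos (by simpa using hx)]
      exact ih (fun e he => hle e (List.mem_cons_of_mem _ he)) hpw.of_cons
    · rw [List.dropWhile_cons, if_neg (by simpa using hx)]
      intro e he
      have hxlt : t < x.1 := lt_of_le_of_ne (hle x (by simp)) (fun h => hx h.symm)
      rcases List.mem_cons.mp he with rfl | he
      · exact hxlt
      · exact lt_of_lt_of_le hxlt ((List.pairwise_cons.mp hpw).1 e he)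

-- one unfolding of B's outer loop
lemma pvGroups_cons (sp : PySem.Dict String (PySem.Set String)) (rooms : Int)
    (x : Int × String × Int × Int) (rest : List (Int × String × Int × Int)) :
    pvGroups sp rooms (x :: rest)
      = (x.1, (pvRun sp rooms x.1 (x :: rest) [] PySem.Set.empty).1)
        :: pvGroups sp rooms (pvRun sp rooms x.1 (x :: rest) [] PySem.Set.empty).2 := by
  rw [pvGroups]

-- main invariant: A's fold appends, after the already-emitted schedule, exactly B's groups
lemma pv_main (items : List (String × List (String × String))) (rooms : Int) :
    ∀ (n : Nat) (l : List (Int × String × Int × Int)) (sched : PySem.Dict Int (List (String × Int × Int)))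
      (sA : PySem.Set (String × Int)),
      l.length ≤ n →
      l.Pairwise (fun a b => a.1 ≤ b.1) →
      sched.keys.Nodup →
      (∀ e ∈ l, sched.contains e.1 = false) →
      (∀ p τ, (p, τ) ∈ sA → ∀ e ∈ l, τ < e.1) →
      (l.foldl (pvStepA items rooms) (sched, sA)).1.items
        = sched.items ++ pvGroups (pvSongIndex items) rooms l := by
  intro n
  induction n with
  | zero =>
    intro l sched sA hlen _ _ _ _
    have hnil : l = [] := List.eq_nil_of_length_eq_zero (Nat.le_zero.mp hlen)
    subst hnil
    simp [pvGroups]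
  | succ n ih =>
    intro l sched sA hlen hpw hnd hfresh hsA
    cases l with
    | nil => simp [pvGroups]
    | cons x rest =>
      have hct : sched.contains x.1 = false := hfresh x (by simp)
      have hxmem : x.1 ∉ sched.keys := fun hm =>
        absurd ((PySem.Dict.contains_iff_mem_keys _ _).mpr hm) (by simp [hct])
      have hrest_le : ∀ e ∈ rest, x.1 ≤ e.1 := fun e he => (List.pairwise_cons.mp hpw).1 e he
      have hstrict : ∀ e ∈ rest.dropWhile (fun e => e.1 == x.1), x.1 < e.1 :=
        pv_dropWhile_lt x.1 rest hrest_le hpw.of_cons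
      have hsd : sched.setdefault x.1 [] = sched.insert x.1 [] :=
        PySem.Dict.setdefault_of_not_contains sched [] hct
      have hbusy0 : ∀ p, (p, x.1) ∈ sA ↔ p ∈ (PySem.Set.empty : PySem.Set String) := by
        intro p
        constructor
        · intro h; exact absurd (hsA p x.1 h x (by simp)) (lt_irrefl _)
        · intro h; exact absurd h (by simp [PySem.Set.empty])
      have hcf := pv_conflict items x.2.1 x.1 sA PySem.Set.empty hbusy0
      have hinter : PySem.Set.inter ((pvSongIndex items).getD x.2.1 PySem.Set.empty)
          (PySem.Set.empty : PySem.Set String) = [] := by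
        rw [List.eq_nil_iff_forall_not_mem]
        intro y hy
        exact absurd ((PySem.Set.mem_inter _ _ _).mp hy).2 (by simp [PySem.Set.empty])
      have hconfA : items.any (fun pr => pr.2.any
          (fun r => r.1 == x.2.1 && PySem.Set.contains sA (pr.1, x.1))) = false := by
        rw [hcf, hinter]; simp
      suffices hgen : ∀ (sched1 : PySem.Dict Int (List (String × Int × Int)))
          (sA1 : PySem.Set (String × Int)) (chosen1 : List (String × Int × Int))
          (busy1 : PySem.Set String),
          sched1.contains x.1 = true →
          sched1.getD x.1 [] = chosen1 →
          (∀ p, (p, x.1) ∈ sA1 ↔ p ∈ busy1) →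
          sched1.keys = sched.keys ++ [x.1] →
          (∀ τ, τ ≠ x.1 → sched1.getD τ [] = sched.getD τ []) →
          (∀ p τ, (p, τ) ∈ sA1 → (p, τ) ∈ sA ∨ τ = x.1) →
          (rest.foldl (pvStepA items rooms) (sched1, sA1)).1.items
            = sched.items ++ (x.1, (pvRun (pvSongIndex items) rooms x.1 rest chosen1 busy1).1)
                :: pvGroups (pvSongIndex items) rooms
                    (pvRun (pvSongIndex items) rooms x.1 rest chosen1 busy1).2 by
        rw [List.foldl_cons, pvGroups_cons]
        simp only [pvStepA, pvRun, hsd, PySem.Dict.getD_insert_self, List.length_nil,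
          Nat.cast_zero, if_true]
        by_cases hfull : rooms ≤ (0 : Int)
        · rw [if_pos hfull, if_pos hfull]
          exact hgen (sched.insert x.1 []) sA [] PySem.Set.empty
            (PySem.Dict.contains_insert_self _ _ _) (PySem.Dict.getD_insert_self _ _ _ _)
            hbusy0 (PySem.Dict.keys_insert_of_not_contains _ _ hct)
            (fun τ hτ => PySem.Dict.getD_insert_of_ne _ _ _ hτ) (fun p τ h => Or.inl h)
        · rw [if_neg hfull, if_neg hfull, if_neg (by rw [hconfA]; simp), if_neg (by rw [hinter]; simp)]
          refine hgen _ _ _ _ ?_ ?_ ?_ ?_ ?_ ?_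
          · simp [PySem.Dict.contains_modify]
          · rw [PySem.Dict.getD_modify_self, PySem.Dict.getD_insert_self, List.nil_append]
          · intro p
            rw [pv_mem_updA, PySem.Set.mem_union, hbusy0]
            constructor
            · rintro (h | ⟨pr, hpr, hmatch, hy⟩)
              · exact Or.inl h
              · refine Or.inr ((pv_mem_songIndex items x.2.1 p).mpr ⟨pr, hpr, ?_, hmatch⟩)
                exact (congrArg Prod.fst hy).symm
            · rintro (h | h)
              · exact Or.inl h
              · obtain ⟨pr, hpr, hp1, hmatch⟩ := (pv_mem_songIndex items x.2.1 p).mp h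
                exact Or.inr ⟨pr, hpr, hmatch, by rw [hp1]⟩
          · rw [PySem.Dict.keys_modify,
              PySem.Dict.keys_insert_of_contains _ _ (PySem.Dict.contains_insert_self _ _ _),
              PySem.Dict.keys_insert_of_not_contains _ _ hct]
          · intro τ hτ
            rw [PySem.Dict.getD_modify_of_ne _ _ _ hτ, PySem.Dict.getD_insert_of_ne _ _ _ hτ]
          · intro p τ h
            rw [pv_mem_updA] at h
            rcases h with h | ⟨pr, hpr, hm, hy⟩
            · exact Or.inl h
            · exact Or.inr (congrArg Prod.snd hy)
      intro sched1 sA1 chosen1 busy1 H2 H3 Hb hkeys1 hgd1 hprop1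
      obtain ⟨sched', sA', e1, e2, e3, e4, e5⟩ :=
        pv_run items rooms x.1 rest sched1 sA1 chosen1 busy1 H2 H3 Hb
      have hLdrop : (pvRun (pvSongIndex items) rooms x.1 rest chosen1 busy1).2
          = rest.dropWhile (fun e => e.1 == x.1) := pvRun_snd _ _ _ _ _ _
      have hsubL : (pvRun (pvSongIndex items) rooms x.1 rest chosen1 busy1).2.Sublist rest :=
        hLdrop ▸ List.dropWhile_sublist _
      have hnd' : sched'.keys.Nodup := by
        rw [e2, hkeys1, List.nodup_append]
        refine ⟨hnd, List.nodup_singleton _, ?_⟩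
        intro a ha b hb
        rw [List.mem_singleton] at hb
        subst hb
        exact fun h => hxmem (h ▸ ha)
      have hfresh' : ∀ e ∈ (pvRun (pvSongIndex items) rooms x.1 rest chosen1 busy1).2,
          sched'.contains e.1 = false := by
        intro e he
        rw [PySem.Dict.contains_eq_decide_mem_keys, e2, hkeys1]
        have h1 : e.1 ∉ sched.keys := fun hm =>
          absurd ((PySem.Dict.contains_iff_mem_keys _ _).mpr hm)
            (by simp [hfresh e (List.mem_cons_of_mem _ (hsubL.subset he))])
        have h2 : e.1 ≠ x.1 := ne_of_gt (hstrict e (hLdrop ▸ he))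
        simp [h1, h2]
      have hsA' : ∀ p τ, (p, τ) ∈ sA' →
          ∀ e ∈ (pvRun (pvSongIndex items) rooms x.1 rest chosen1 busy1).2, τ < e.1 := by
        intro p τ h e he
        rcases e5 p τ h with h | rfl
        · rcases hprop1 p τ h with h | rfl
          · exact hsA p τ h e (List.mem_cons_of_mem _ (hsubL.subset he))
          · exact hstrict e (hLdrop ▸ he)
        · exact hstrict e (hLdrop ▸ he)
      have hlenL : (pvRun (pvSongIndex items) rooms x.1 rest chosen1 busy1).2.length ≤ n := by
        have := List.length_dropWhile_le (fun e : Int × String × Int × Int => e.1 == x.1) rest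
        rw [hLdrop]
        simp only [List.length_cons] at hlen
        omega
      have hIH := ih _ sched' sA' hlenL (List.Pairwise.sublist hsubL hpw.of_cons) hnd' hfresh' hsA'
      have hitems : sched'.items = sched.items
          ++ [(x.1, (pvRun (pvSongIndex items) rooms x.1 rest chosen1 busy1).1)] := by
        rw [PySem.Dict.items_eq_map_keys sched' hnd' [], e2, hkeys1, List.map_append]
        congr 1
        · rw [PySem.Dict.items_eq_map_keys sched hnd []]
          apply List.map_congr_left
          intro k hk
          have hkne : k ≠ x.1 := fun h => hxmem (h ▸ hk)
          rw [e4 k hkne, hgd1 k hkne]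
        · simp [e3]
      rw [e1, hIH, hitems, List.append_assoc, List.singleton_append]

-- sorted by a (time, _) lex key gives nondecreasing times
lemma pv_mono {β : Type} [LinearOrder β] (xs : List (Int × String × Int × Int))
    (f : (Int × String × Int × Int) → β) :
    (PySem.List.sorted xs (fun x => (toLex (x.1, f x) : Lex (Int × β)))).Pairwise
      (fun a b => a.1 ≤ b.1) := by
  refine (PySem.List.sorted_pairwise xs _).imp ?_
  intro a b h
  rcases Prod.Lex.toLex_le_toLex.mp h with h | ⟨h, _⟩
  · exact le_of_lt h
  · exact le_of_eq h

-- specialization of pv_main to the initial state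
lemma pv_top (items : List (String × List (String × String))) (rooms : Int)
    (l : List (Int × String × Int × Int)) (hmono : l.Pairwise (fun a b => a.1 ≤ b.1)) :
    (l.foldl (pvStepA items rooms) (PySem.Dict.empty, PySem.Set.empty)).1.items
      = pvGroups (pvSongIndex items) rooms l := by
  have h := pv_main items rooms l.length l PySem.Dict.empty PySem.Set.empty le_rfl hmono
    PySem.Dict.nodup_keys_empty (by intro e _; simp) (by intro p τ h; simp [PySem.Set.empty] at h)
  simpa using h

-- ===== VERDICT (by name: the statement is the Claim_ definition above) =====
theorem assign_schedule_spec : Claim_equal_assign_schedule := by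
  intro time_list person_role rooms sort_by _
  show _ = _
  unfold assign_schedule assign_schedule_alt
  split_ifs <;> exact pv_top _ _ _ (pv_mono _ _)
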